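-- pv_equiv track=rewrite | github.com/blester125/MIPy-Talk-Jan-2-2020 | pairwise_manhattan/pairwise_manhattan.py | pairwise_manhattan_python_v1
-- ===== SOURCE A (Python) =====
-- from typing import List
--
-- def pairwise_manhattan_python_v1(points: List[List[int]]) -> List[List[int]]:
--     results = []
--     for x in points:
--         dist = []
--         for y in points:
--             dist.append(sum(abs(x_i - y_i) for x_i, y_i in zip(x, y)))
--         results.append(dist)
--     return results
-- ===== SOURCE B (Python) =====
-- def pairwise_manhattan_python_v1(points):
--     n = len(points)
--     results = [[0] * n for _ in range(n)]
--     for i in range(n):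
--         for j in range(i + 1, n):
--             d = sum(abs(a - b) for a, b in zip(points[i], points[j]))
--             results[i][j] = d
--             results[j][i] = d
--     return results
-- ===== Notes on version B (the rewrite author's own statement) =====
-- stated objective: faster
-- what changed: B preallocates an n-by-n zero matrix and fills only the upper triangle, mirroring each distance to the symmetric entry and leaving the diagonal zero, so each unordered pair's distance is computed once instead of twice (measured about 2x faster).
import Mathlib
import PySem

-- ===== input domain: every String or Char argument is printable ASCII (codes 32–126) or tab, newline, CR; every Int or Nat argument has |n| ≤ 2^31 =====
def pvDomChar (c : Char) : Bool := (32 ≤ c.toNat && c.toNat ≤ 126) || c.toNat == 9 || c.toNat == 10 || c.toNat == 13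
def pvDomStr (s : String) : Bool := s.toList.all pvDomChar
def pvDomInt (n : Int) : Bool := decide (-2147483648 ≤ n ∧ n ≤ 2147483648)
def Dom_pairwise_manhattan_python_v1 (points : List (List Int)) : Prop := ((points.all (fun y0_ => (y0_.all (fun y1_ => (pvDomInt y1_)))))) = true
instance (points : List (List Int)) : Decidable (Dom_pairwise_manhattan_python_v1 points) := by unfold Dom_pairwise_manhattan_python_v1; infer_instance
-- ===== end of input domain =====

-- B preallocates an n×n zero matrix and fills only the upper triangle, mirroring each
-- distance to the symmetric entry (diagonal stays 0); A recomputes every ordered pair.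

-- ===== PORT A =====
-- sum(abs(x_i - y_i) for x_i, y_i in zip(x, y)) : Python sum = left fold of + from 0
def pvDist (x y : List Int) : Int := (x.zip y).foldl (fun acc p => acc + |p.1 - p.2|) 0

-- for x in points: dist = []; for y in points: dist.append(...); results.append(dist)
def pairwise_manhattan_python_v1 (points : List (List Int)) : List (List Int) :=
  points.foldl (fun results x =>
    results ++ [points.foldl (fun dist y => dist ++ [pvDist x y]) []]) []

-- ===== PORT B =====
-- results[i][j] = v  (i, j are in range here, so Nat indexing matches Python exactly)
def pvSetM (m : List (List Int)) (i j : Nat) (v : Int) : List (List Int) :=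
  m.set i ((m.getD i []).set j v)

-- transliteration of Source B: preallocated zero matrix, upper-triangle fill with mirror writes
def pairwise_manhattan_python_v1_alt (points : List (List Int)) : List (List Int) :=
  let n := points.length
  (List.range n).foldl (fun results i =>
    (List.range' (i + 1) (n - (i + 1))).foldl (fun results j =>
      let d := pvDist (points.getD i []) (points.getD j [])
      pvSetM (pvSetM results i j d) j i d) results)
    (List.replicate n (List.replicate n 0))

-- ===== PRECONDITION & SPEC =====
def Spec_pairwise_manhattan_python_v1 (points : List (List Int)) (out : List (List Int)) : Prop := out = pairwise_manhattan_python_v1_alt points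
instance (points : List (List Int)) (out : List (List Int)) : Decidable (Spec_pairwise_manhattan_python_v1 points out) := by unfold Spec_pairwise_manhattan_python_v1; infer_instance

-- ===== CLAIM (what is proved, stated in full; the proofs are below) =====
def Claim_equal_pairwise_manhattan_python_v1 : Prop := ∀ (points : List (List Int)), Dom_pairwise_manhattan_python_v1 points → Spec_pairwise_manhattan_python_v1 points (pairwise_manhattan_python_v1 points)

-- ===== LEMMAS AND PROOFS =====

-- the matrix entry at (a, b), and the shape invariant
def pvEntry (m : List (List Int)) (a b : Nat) : Int := (m.getD a []).getD b 0

def pvShape (n : Nat) (m : List (List Int)) : Prop :=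
  m.length = n ∧ ∀ r ∈ m, r.length = n

lemma pvFoldl_absdiff_zip_self (x : List Int) (acc : Int) :
    (x.zip x).foldl (fun acc p => acc + |p.1 - p.2|) acc = acc := by
  induction x generalizing acc with
  | nil => simp
  | cons a t ih =>
    rw [List.zip_cons_cons, List.foldl_cons]
    simpa using ih acc

lemma pvDist_self (x : List Int) : pvDist x x = 0 := by
  simp [pvDist, pvFoldl_absdiff_zip_self]

lemma pvFoldl_absdiff_zip_comm (x y : List Int) (acc : Int) :
    (x.zip y).foldl (fun acc p => acc + |p.1 - p.2|) acc =
    (y.zip x).foldl (fun acc p => acc + |p.1 - p.2|) acc := by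
  induction x generalizing y acc with
  | nil => simp
  | cons a t ih =>
    cases y with
    | nil => simp
    | cons b u =>
      rw [List.zip_cons_cons, List.zip_cons_cons, List.foldl_cons, List.foldl_cons,
        abs_sub_comm]
      exact ih u (acc + |b - a|)

lemma pvDist_comm (x y : List Int) : pvDist x y = pvDist y x := by
  simp [pvDist, pvFoldl_absdiff_zip_comm]

lemma pvGetD_set_ne {α : Type} (m : List α) (d : α) (i : Nat) (r : α) (a : Nat) (ha : a ≠ i) :
    (m.set i r).getD a d = m.getD a d := by
  simp [List.getD, List.getElem?_set_ne (by omega : i ≠ a)]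

lemma pvGetD_set_self {α : Type} (m : List α) (d : α) (i : Nat) (v : α) (hi : i < m.length) :
    (m.set i v).getD i d = v := by
  rw [List.getD_eq_getElem _ _ (by simpa using hi)]
  simp

lemma pvShape_setM {n : Nat} {m : List (List Int)} (h : pvShape n m)
    {i : Nat} (hi : i < n) (j : Nat) (v : Int) :
    pvShape n (pvSetM m i j v) := by
  obtain ⟨hlen, hrows⟩ := h
  refine ⟨by simp [pvSetM, hlen], ?_⟩
  intro r hr
  rcases List.mem_or_eq_of_mem_set hr with h1 | h1
  · exact hrows r h1
  · subst h1
    have hi' : i < m.length := by omega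
    rw [List.getD_eq_getElem _ _ hi']
    simpa using hrows _ (List.getElem_mem hi')

lemma pvEntry_setM {n : Nat} {m : List (List Int)} (h : pvShape n m)
    {i j : Nat} (hi : i < n) (hj : j < n) (v : Int) (a b : Nat) :
    pvEntry (pvSetM m i j v) a b = if a = i ∧ b = j then v else pvEntry m a b := by
  obtain ⟨hlen, hrows⟩ := h
  have hi' : i < m.length := by omega
  have hrow : (m.getD i []).length = n := by
    rw [List.getD_eq_getElem _ _ hi']
    exact hrows _ (List.getElem_mem hi')
  unfold pvEntry pvSetM
  by_cases hai : a = i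
  · subst hai
    rw [pvGetD_set_self _ _ _ _ hi']
    by_cases hbj : b = j
    · subst hbj
      rw [pvGetD_set_self _ _ _ _ (by rw [hrow]; omega)]
      simp
    · rw [pvGetD_set_ne _ _ _ _ _ hbj]
      simp [hbj]
  · rw [pvGetD_set_ne _ _ _ _ _ hai]
    simp [hai]

-- characterisation of the inner loop over a list L of column indices, all > i
lemma pvInner (points : List (List Int)) (n i : Nat) (hi : i < n)
    (L : List Nat) (hL : ∀ j ∈ L, i < j ∧ j < n) (hnd : L.Nodup) :
    ∀ (m : List (List Int)), pvShape n m →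
      pvShape n (L.foldl (fun results j =>
          let d := pvDist (points.getD i []) (points.getD j [])
          pvSetM (pvSetM results i j d) j i d) m) ∧
      ∀ a b : Nat,
        pvEntry (L.foldl (fun results j =>
          let d := pvDist (points.getD i []) (points.getD j [])
          pvSetM (pvSetM results i j d) j i d) m) a b =
        if a = i ∧ b ∈ L then pvDist (points.getD i []) (points.getD b [])
        else if b = i ∧ a ∈ L then pvDist (points.getD i []) (points.getD a [])
        else pvEntry m a b := by
  induction L with
  | nil => exact fun m hm => ⟨hm, fun a b => by simp⟩
  | cons j L' ih =>
    intro m hm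
    obtain ⟨hij, hjn⟩ := hL j (List.mem_cons_self)
    have hL' : ∀ x ∈ L', i < x ∧ x < n := fun x hx => hL x (List.mem_cons_of_mem _ hx)
    have hjL' : j ∉ L' := (List.nodup_cons.mp hnd).1
    have hnd' : L'.Nodup := (List.nodup_cons.mp hnd).2
    have hiL' : i ∉ L' := fun hx => absurd (hL' i hx).1 (lt_irrefl i)
    have hij' : i ≠ j := Nat.ne_of_lt hij
    have hm1 : pvShape n (pvSetM m i j (pvDist (points.getD i []) (points.getD j []))) :=
      pvShape_setM hm hi j _
    have hm2 : pvShape n (pvSetM (pvSetM m i j (pvDist (points.getD i []) (points.getD j [])))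
        j i (pvDist (points.getD i []) (points.getD j []))) :=
      pvShape_setM hm1 hjn i _
    obtain ⟨hsh, hent⟩ := ih hL' hnd' _ hm2
    constructor
    · simpa using hsh
    · intro a b
      have e2 := pvEntry_setM hm1 hjn hi (pvDist (points.getD i []) (points.getD j [])) a b
      have e1 := pvEntry_setM hm hi hjn (pvDist (points.getD i []) (points.getD j [])) a b
      simp only [List.foldl_cons]
      rw [hent a b, e2, e1]
      simp only [List.mem_cons]
      by_cases hai : a = i
      · by_cases hbj : b = j
        · simp [hai, hbj, hjL', hij', Ne.symm hij']
        · by_cases hbL : b ∈ L'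
          · have hbi : ¬ b = i := fun h => hiL' (h ▸ hbL)
            simp [hai, hbL, hbj, hbi]
          · by_cases hbi : b = i
            · simp [hai, hbi, hbj, hbL, hiL', hij']
            · simp [hai, hbj, hbL, hbi]
      · by_cases hbi : b = i
        · by_cases haj : a = j
          · simp [haj, hbi, hai, hij', Ne.symm hij', hjL']
          · by_cases haL : a ∈ L'
            · simp [hbi, hai, haj, haL]
            · simp [hbi, hai, haj, haL]
        · simp [hai, hbi]

-- characterisation of the outer loop (fuel = number of remaining outer indices)
lemma pvOuter (points : List (List Int)) (n : Nat) (hn : n = points.length) :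
    ∀ (fuel k : Nat) (m : List (List Int)), n - k = fuel → k ≤ n → pvShape n m →
      (∀ a b : Nat, a < n → b < n →
        pvEntry m a b = if a ≠ b ∧ (a < k ∨ b < k)
          then pvDist (points.getD a []) (points.getD b []) else 0) →
      pvShape n ((List.range' k (n - k)).foldl (fun results i =>
          (List.range' (i + 1) (n - (i + 1))).foldl (fun results j =>
            let d := pvDist (points.getD i []) (points.getD j [])
            pvSetM (pvSetM results i j d) j i d) results) m) ∧
      ∀ a b : Nat, a < n → b < n →
        pvEntry ((List.range' k (n - k)).foldl (fun results i =>
          (List.range' (i + 1) (n - (i + 1))).foldl (fun results j =>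
            let d := pvDist (points.getD i []) (points.getD j [])
            pvSetM (pvSetM results i j d) j i d) results) m) a b =
        if a ≠ b then pvDist (points.getD a []) (points.getD b []) else 0 := by
  intro fuel
  induction fuel with
  | zero =>
    intro k m hfuel hk hm hinv
    rw [hfuel]
    simp only [List.range'_zero, List.foldl_nil]
    refine ⟨hm, ?_⟩
    intro a b ha hb
    have hkn : k = n := by omega
    rw [hinv a b ha hb]
    by_cases hab : a = b <;> simp [hab] <;> omega
  | succ f ihf =>
    intro k m hfuel hk hm hinv
    have hkn : k < n := by omega
    -- peel the outer index k
    rw [hfuel, List.range'_succ]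
    simp only [List.foldl_cons]
    -- the inner loop at i = k
    have hmemL : ∀ x ∈ List.range' (k + 1) (n - (k + 1)), k < x ∧ x < n := by
      intro x hx
      rw [List.mem_range'_1] at hx
      omega
    have hndL : (List.range' (k + 1) (n - (k + 1))).Nodup := List.nodup_range'
    obtain ⟨hsh1, hent1⟩ := pvInner points n k hkn _ hmemL hndL m hm
    -- new invariant at k + 1
    have hinv' : ∀ a b : Nat, a < n → b < n →
        pvEntry ((List.range' (k + 1) (n - (k + 1))).foldl (fun results j =>
          let d := pvDist (points.getD k []) (points.getD j [])
          pvSetM (pvSetM results k j d) j k d) m) a b =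
        if a ≠ b ∧ (a < k + 1 ∨ b < k + 1)
          then pvDist (points.getD a []) (points.getD b []) else 0 := by
      intro a b ha hb
      rw [hent1 a b, hinv a b ha hb]
      simp only [List.mem_range'_1]
      by_cases hak : a = k
      · by_cases hbgt : k < b
        · simp [hak, show k + 1 ≤ b by omega, show b < k + 1 + (n - (k + 1)) by omega,
            show k ≠ b by omega, Nat.lt_succ_self]
        · by_cases hbk : b = k
          · simp [hak, hbk, show ¬ (k + 1 ≤ k) by omega]
          · simp [hak, hbk, show ¬ (k + 1 ≤ b) by omega,
              show k ≠ b by omega, show b < k by omega, show b < k + 1 by omega]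
      · by_cases hbk : b = k
        · by_cases hagt : k < a
          · simp [hbk, hak, show k + 1 ≤ a by omega, show a < k + 1 + (n - (k + 1)) by omega,
              show a ≠ k by omega, Nat.lt_succ_self, pvDist_comm]
          · simp [hak, hbk, show ¬ (k + 1 ≤ a) by omega,
              show a ≠ b by omega, show a < k by omega, show a < k + 1 by omega]
        · by_cases hab : a = b
          · simp [hab, hak, hbk]
          · by_cases hlt : a < k ∨ b < k
            · simp only [hak, hbk, hab, List.mem_range'_1]
              simp only [if_neg (by omega : ¬ (a = k ∧ k + 1 ≤ b ∧ b < k + 1 + (n - (k + 1)))),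
                if_neg (by omega : ¬ (b = k ∧ k + 1 ≤ a ∧ a < k + 1 + (n - (k + 1)))),
                if_pos (show (a ≠ b ∧ (a < k ∨ b < k)) from ⟨hab, hlt⟩),
                if_pos (show (a ≠ b ∧ (a < k + 1 ∨ b < k + 1)) from ⟨hab, by omega⟩)]
              simp
            · simp only [hak, hbk, hab, List.mem_range'_1]
              simp only [if_neg (by omega : ¬ (a = k ∧ k + 1 ≤ b ∧ b < k + 1 + (n - (k + 1)))),
                if_neg (by omega : ¬ (b = k ∧ k + 1 ≤ a ∧ a < k + 1 + (n - (k + 1)))),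
                if_neg (show ¬ (a ≠ b ∧ (a < k ∨ b < k)) from fun h => hlt h.2),
                if_neg (show ¬ (a ≠ b ∧ (a < k + 1 ∨ b < k + 1)) from fun h => by
                  rcases h.2 with h2 | h2 <;> omega)]
              simp
    obtain ⟨hsh2, hent2⟩ := ihf (k + 1) _ (by omega) (by omega) hsh1 hinv'
    rw [show n - (k + 1) = f from by omega] at hsh2 hent2 ⊢
    exact ⟨hsh2, hent2⟩

-- the append-accumulating fold of port A is a map
lemma pvFoldl_append_map {α β : Type} (f : α → β) (l : List α) (acc : List β) :
    l.foldl (fun dist y => dist ++ [f y]) acc = acc ++ l.map f := by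
  induction l generalizing acc with
  | nil => simp
  | cons a t ih => simp [ih]

-- ===== VERDICT (by name: the statement is the Claim_ definition above) =====
lemma pvEntry_replicate (n a b : Nat) :
    pvEntry (List.replicate n (List.replicate n (0 : Int))) a b = 0 := by
  simp only [pvEntry, List.getD, List.getElem?_replicate]
  split <;> simp

lemma pvShape_replicate (n : Nat) :
    pvShape n (List.replicate n (List.replicate n (0 : Int))) := by
  refine ⟨by simp, ?_⟩
  intro r hr
  rw [List.eq_of_mem_replicate hr]
  simp

lemma pvAlt_entries (points : List (List Int)) :
    pvShape points.length (pairwise_manhattan_python_v1_alt points) ∧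
    ∀ a b : Nat, a < points.length → b < points.length →
      pvEntry (pairwise_manhattan_python_v1_alt points) a b =
        pvDist (points.getD a []) (points.getD b []) := by
  have h := pvOuter points points.length rfl (points.length) 0
    (List.replicate points.length (List.replicate points.length 0)) (by omega) (by omega)
    (pvShape_replicate points.length)
    (by intro a b ha hb; rw [pvEntry_replicate]; split_ifs with h1 <;> first | rfl | omega)
  obtain ⟨hsh, hent⟩ := h
  have halt : pairwise_manhattan_python_v1_alt points =
      (List.range' 0 (points.length - 0)).foldl (fun results i =>
        (List.range' (i + 1) (points.length - (i + 1))).foldl (fun results j =>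
          let d := pvDist (points.getD i []) (points.getD j [])
          pvSetM (pvSetM results i j d) j i d) results)
        (List.replicate points.length (List.replicate points.length 0)) := by
    simp only [pairwise_manhattan_python_v1_alt, List.range_eq_range', Nat.sub_zero]
  rw [halt]
  refine ⟨hsh, ?_⟩
  intro a b ha hb
  rw [hent a b ha hb]
  by_cases hab : a = b
  · simp [hab, pvDist_self]
  · simp [hab]

lemma pvA_eq_map (points : List (List Int)) :
    pairwise_manhattan_python_v1 points =
      points.map (fun x => points.map (fun y => pvDist x y)) := by
  unfold pairwise_manhattan_python_v1
  have h : ∀ x : List Int,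
      points.foldl (fun dist y => dist ++ [pvDist x y]) [] = points.map (fun y => pvDist x y) :=
    fun x => by simpa using pvFoldl_append_map (fun y => pvDist x y) points []
  calc points.foldl (fun results x =>
        results ++ [points.foldl (fun dist y => dist ++ [pvDist x y]) []]) []
      = [] ++ points.map (fun x => points.foldl (fun dist y => dist ++ [pvDist x y]) []) :=
        pvFoldl_append_map _ points []
    _ = points.map (fun x => points.map (fun y => pvDist x y)) := by
        simp only [List.nil_append]
        exact List.map_congr_left (fun x _ => h x)

-- ===== VERDICT (by name: the statement is the Claim_ definition above) =====
theorem pairwise_manhattan_python_v1_spec : Claim_equal_pairwise_manhattan_python_v1 := by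
  intro points _
  unfold Spec_pairwise_manhattan_python_v1
  obtain ⟨⟨hlen, hrows⟩, hent⟩ := pvAlt_entries points
  rw [pvA_eq_map]
  symm
  apply List.ext_getElem
  · simp [hlen]
  · intro a ha1 ha2
    have haN : a < points.length := by simpa [hlen] using ha1
    have hrowlen : (pairwise_manhattan_python_v1_alt points)[a].length = points.length :=
      hrows _ (List.getElem_mem ha1)
    apply List.ext_getElem
    · simp [hrowlen]
    · intro b hb1 hb2
      have hbN : b < points.length := by simpa [hrowlen] using hb1
      have hgA : (pairwise_manhattan_python_v1_alt points)[a]'ha1 =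
          (pairwise_manhattan_python_v1_alt points).getD a [] :=
        (List.getD_eq_getElem _ _ ha1).symm
      have : ((pairwise_manhattan_python_v1_alt points)[a]'ha1)[b]'hb1 =
          pvEntry (pairwise_manhattan_python_v1_alt points) a b := by
        rw [pvEntry, ← hgA, List.getD_eq_getElem _ _ hb1]
      rw [this, hent a b haN hbN]
      simp [List.getElem?_eq_getElem haN, List.getElem?_eq_getElem hbN]
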